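-- pv_equiv track=rewrite | github.com/Alhaque-786/minimum-cost | main.py | initialize_weights
-- ===== SOURCE A (Python) =====
-- def initialize_weights(data, stocks):
--     weights = {'C1': 0, 'C2': 0, 'C3': 0, 'L1': 0}
--     for prod, count in data.items():
--         if prod in ['A', 'B', 'C']:
--             weights['C1'] += count * stocks['C1'][prod]
--         elif prod in ['D', 'E', 'F']:
--             weights['C2'] += count * stocks['C2'][prod]
--         elif prod in ['G', 'H', 'I']:
--             weights['C3'] += count * stocks['C3'][prod]
--     return weights
-- ===== SOURCE B (Python) =====
-- CATS = {'C1': ('A', 'B', 'C'), 'C2': ('D', 'E', 'F'), 'C3': ('G', 'H', 'I')}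
--
-- def initialize_weights(data, stocks):
--     # Iterate over the fixed 9 product letters instead of over data.
--     weights = {cat: sum(data[p] * stocks[cat][p] for p in prods if p in data)
--                for cat, prods in CATS.items()}
--     weights['L1'] = 0
--     return weights
-- ===== Notes on version B (the rewrite author's own statement) =====
-- stated objective: alternative
-- what changed: B inverts the traversal: instead of one pass over all of data with an if/elif category chain, it loops over the nine fixed product letters grouped by category and looks each one up in data.
import Mathlib
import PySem

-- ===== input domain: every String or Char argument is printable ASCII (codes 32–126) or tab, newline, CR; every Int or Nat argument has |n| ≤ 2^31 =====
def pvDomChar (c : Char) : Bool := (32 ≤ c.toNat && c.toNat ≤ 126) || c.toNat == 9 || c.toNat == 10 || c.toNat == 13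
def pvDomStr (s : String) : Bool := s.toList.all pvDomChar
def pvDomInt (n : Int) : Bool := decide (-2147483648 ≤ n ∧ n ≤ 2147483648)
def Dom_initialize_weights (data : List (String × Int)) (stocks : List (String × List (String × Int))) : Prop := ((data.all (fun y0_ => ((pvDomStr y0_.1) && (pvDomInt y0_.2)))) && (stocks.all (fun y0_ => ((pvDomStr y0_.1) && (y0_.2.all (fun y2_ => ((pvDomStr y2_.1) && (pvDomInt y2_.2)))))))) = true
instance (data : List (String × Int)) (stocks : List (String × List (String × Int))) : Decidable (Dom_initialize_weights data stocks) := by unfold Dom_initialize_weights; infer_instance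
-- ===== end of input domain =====

-- B inverts the traversal: instead of one pass over data with an if/elif category chain,
-- it loops over the nine fixed product letters grouped by category and looks each one up
-- in data. A raises KeyError when a needed stocks lookup is missing — those inputs are
-- excluded by Pre_, as are assoc lists with repeated data keys (no Python dict has them).


-- ===== PORT A =====
-- loop body of A; stocks['C1'][prod] raises KeyError when missing, ported with getD
-- (default [] / 0), exact on Pre_ which excludes those inputs.
def stepA (stocks : List (String × List (String × Int)))
    (w : PySem.Dict String Int) (pc : String × Int) : PySem.Dict String Int :=
  if pc.1 = "A" ∨ pc.1 = "B" ∨ pc.1 = "C" then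
    w.modify "C1" 0 (· + pc.2 * (PySem.Dict.mk ((PySem.Dict.mk stocks).getD "C1" [])).getD pc.1 0)
  else if pc.1 = "D" ∨ pc.1 = "E" ∨ pc.1 = "F" then
    w.modify "C2" 0 (· + pc.2 * (PySem.Dict.mk ((PySem.Dict.mk stocks).getD "C2" [])).getD pc.1 0)
  else if pc.1 = "G" ∨ pc.1 = "H" ∨ pc.1 = "I" then
    w.modify "C3" 0 (· + pc.2 * (PySem.Dict.mk ((PySem.Dict.mk stocks).getD "C3" [])).getD pc.1 0)
  else w

def initialize_weights (data : List (String × Int)) (stocks : List (String × List (String × Int))) : List (String × Int) :=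
  (data.foldl (stepA stocks) (PySem.Dict.mk [("C1", 0), ("C2", 0), ("C3", 0), ("L1", 0)])).items

-- ===== PORT B =====
-- module-level CATS table of Source B
def pvCats : List (String × List String) :=
  [("C1", ["A", "B", "C"]), ("C2", ["D", "E", "F"]), ("C3", ["G", "H", "I"])]

-- sum(data[p] * stocks[cat][p] for p in prods if p in data)
def catWeight (data : List (String × Int)) (stocks : List (String × List (String × Int)))
    (cat : String) (prods : List String) : Int :=
  prods.foldl (fun s p =>
    if ((PySem.Dict.mk data).get? p).isSome then
      s + (PySem.Dict.mk data).getD p 0 * (PySem.Dict.mk ((PySem.Dict.mk stocks).getD cat [])).getD p 0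
    else s) 0

def initialize_weights_alt (data : List (String × Int)) (stocks : List (String × List (String × Int))) : List (String × Int) :=
  ((pvCats.foldl (fun w cp => w.insert cp.1 (catWeight data stocks cp.1 cp.2)) PySem.Dict.empty).insert "L1" 0).items

-- ===== PRECONDITION & SPEC =====
-- true iff stocks[cat][prod] succeeds in Python (cat present and prod present in it)
def catOk (stocks : List (String × List (String × Int))) (cat prod : String) : Bool :=
  match (PySem.Dict.mk stocks).get? cat with
  | none => false
  | some m => ((PySem.Dict.mk m).get? prod).isSome

-- Pre_ excludes (a) the inputs where A raises KeyError — some product of data lies in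
-- A..I but stocks lacks its category key or the product key inside it — and (b) assoc
-- lists whose data keys repeat, which represent no Python dict (dict keys are unique).
def Pre_initialize_weights (data : List (String × Int)) (stocks : List (String × List (String × Int))) : Prop :=
  (data.map Prod.fst).Nodup ∧
  ∀ p ∈ data,
    ((p.1 = "A" ∨ p.1 = "B" ∨ p.1 = "C") → catOk stocks "C1" p.1 = true) ∧
    ((p.1 = "D" ∨ p.1 = "E" ∨ p.1 = "F") → catOk stocks "C2" p.1 = true) ∧
    ((p.1 = "G" ∨ p.1 = "H" ∨ p.1 = "I") → catOk stocks "C3" p.1 = true)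
instance (data : List (String × Int)) (stocks : List (String × List (String × Int))) : Decidable (Pre_initialize_weights data stocks) := by unfold Pre_initialize_weights; infer_instance

def pvWitness_initialize_weights : (List (String × Int)) × (List (String × List (String × Int))) :=
  ([("A", 2), ("E", 3), ("Z", 9)], [("C1", [("A", 5)]), ("C2", [("E", 7)]), ("C3", [])])

def Spec_initialize_weights (data : List (String × Int)) (stocks : List (String × List (String × Int))) (out : List (String × Int)) : Prop := out = initialize_weights_alt data stocks
instance (data : List (String × Int)) (stocks : List (String × List (String × Int))) (out : List (String × Int)) : Decidable (Spec_initialize_weights data stocks out) := by unfold Spec_initialize_weights; infer_instance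

-- ===== CLAIM (what is proved, stated in full; the proofs are below) =====
def Claim_equal_initialize_weights : Prop := ∀ (data : List (String × Int)) (stocks : List (String × List (String × Int))), Dom_initialize_weights data stocks → Pre_initialize_weights data stocks → Spec_initialize_weights data stocks (initialize_weights data stocks)

-- ===== LEMMAS AND PROOFS =====

-- stocks[cat][p] with A's/B's getD defaults (both ports build this same expression)
def stk (stocks : List (String × List (String × Int))) (cat p : String) : Int :=
  (PySem.Dict.mk ((PySem.Dict.mk stocks).getD cat [])).getD p 0

-- contribution of one data item to A's running weight of category cat (letter set ps)
def hit (stocks : List (String × List (String × Int))) (cat : String) (ps : List String)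
    (pc : String × Int) : Int :=
  if pc.1 ∈ ps then pc.2 * stk stocks cat pc.1 else 0

-- B's per-letter summand
def gB (data : List (String × Int)) (stocks : List (String × List (String × Int)))
    (cat p : String) : Int :=
  if ((PySem.Dict.mk data).get? p).isSome then (PySem.Dict.mk data).getD p 0 * stk stocks cat p else 0

theorem sum_hit_nil (stocks : List (String × List (String × Int)))
    (cat : String) (data : List (String × Int)) :
    (data.map (hit stocks cat [])).sum = 0 := by
  induction data with
  | nil => rfl
  | cons h t ih => simp [hit, ih]

theorem sum_single_absent (stocks : List (String × List (String × Int))) (cat q : String)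
    (data : List (String × Int)) (hq : q ∉ data.map Prod.fst) :
    (data.map (hit stocks cat [q])).sum = 0 := by
  induction data with
  | nil => rfl
  | cons h t ih =>
      simp only [List.map_cons, List.mem_cons, not_or] at hq
      obtain ⟨hne, hq'⟩ := hq
      simp only [List.map_cons, List.sum_cons, ih hq']
      simp [hit, Ne.symm hne]

theorem sum_single (stocks : List (String × List (String × Int))) (cat q : String)
    (data : List (String × Int)) (hnd : (data.map Prod.fst).Nodup) :
    (data.map (hit stocks cat [q])).sum = gB data stocks cat q := by
  induction data with
  | nil => simp [gB, PySem.Dict.get?]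
  | cons h t ih =>
      obtain ⟨k, v⟩ := h
      simp only [List.map_cons, List.nodup_cons] at hnd
      obtain ⟨hnotin, hnd'⟩ := hnd
      by_cases hq : k = q
      · subst hq
        rw [List.map_cons, List.sum_cons, sum_single_absent stocks cat k t hnotin]
        simp [hit, gB, PySem.Dict.get?_mk_cons, PySem.Dict.getD_eq_get?_getD]
      · rw [List.map_cons, List.sum_cons]
        have hz : hit stocks cat [q] (k, v) = 0 := by simp [hit, hq]
        rw [hz, zero_add, ih hnd']
        simp [gB, PySem.Dict.get?_mk_cons, hq, PySem.Dict.getD_eq_get?_getD]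

theorem sum_hit (stocks : List (String × List (String × Int))) (cat : String)
    (ps : List String) (hps : ps.Nodup) (data : List (String × Int))
    (hnd : (data.map Prod.fst).Nodup) :
    (data.map (hit stocks cat ps)).sum = (ps.map (gB data stocks cat)).sum := by
  induction ps with
  | nil => simp [sum_hit_nil]
  | cons q rest ih =>
      simp only [List.nodup_cons] at hps
      obtain ⟨hqr, hrest⟩ := hps
      have hsplit : ∀ pc, hit stocks cat (q :: rest) pc
          = hit stocks cat [q] pc + hit stocks cat rest pc := by
        intro pc
        by_cases hq : pc.1 = q
        · simp [hit, hq, hqr]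
        · by_cases hm : pc.1 ∈ rest <;> simp [hit, hq, hm]
      calc (data.map (hit stocks cat (q :: rest))).sum
          = (data.map (fun pc => hit stocks cat [q] pc + hit stocks cat rest pc)).sum := by
            rw [List.map_congr_left (fun pc _ => hsplit pc)]
        _ = (data.map (hit stocks cat [q])).sum + (data.map (hit stocks cat rest)).sum :=
            PySem.List.sum_map_add_int _ _ _
        _ = gB data stocks cat q + (rest.map (gB data stocks cat)).sum := by
            rw [sum_single stocks cat q data hnd, ih hrest]
        _ = ((q :: rest).map (gB data stocks cat)).sum := by simp

-- A's fold over data, characterized on the literal 4-key weight dict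
theorem A_fold (stocks : List (String × List (String × Int))) (data : List (String × Int)) :
    ∀ (a b c : Int),
    (data.foldl (stepA stocks) (PySem.Dict.mk [("C1", a), ("C2", b), ("C3", c), ("L1", 0)])).items
    = [("C1", a + (data.map (hit stocks "C1" ["A", "B", "C"])).sum),
       ("C2", b + (data.map (hit stocks "C2" ["D", "E", "F"])).sum),
       ("C3", c + (data.map (hit stocks "C3" ["G", "H", "I"])).sum),
       ("L1", 0)] := by
  induction data with
  | nil => intro a b c; simp
  | cons h t ih =>
      intro a b c
      simp only [List.foldl_cons, List.map_cons, List.sum_cons]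
      by_cases h1 : h.1 = "A" ∨ h.1 = "B" ∨ h.1 = "C"
      · have hs : stepA stocks (PySem.Dict.mk [("C1", a), ("C2", b), ("C3", c), ("L1", 0)]) h
            = PySem.Dict.mk [("C1", a + h.2 * stk stocks "C1" h.1), ("C2", b), ("C3", c), ("L1", 0)] := by
          simp [stepA, h1, stk, PySem.Dict.modify]
          rfl
        rw [hs, ih]
        have e1 : hit stocks "C1" ["A", "B", "C"] h = h.2 * stk stocks "C1" h.1 := by
          simp [hit, h1]
        have e2 : hit stocks "C2" ["D", "E", "F"] h = 0 := by
          rcases h1 with h1 | h1 | h1 <;> simp [hit, h1]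
        have e3 : hit stocks "C3" ["G", "H", "I"] h = 0 := by
          rcases h1 with h1 | h1 | h1 <;> simp [hit, h1]
        rw [e1, e2, e3]; ring_nf
      · by_cases h2 : h.1 = "D" ∨ h.1 = "E" ∨ h.1 = "F"
        · have hs : stepA stocks (PySem.Dict.mk [("C1", a), ("C2", b), ("C3", c), ("L1", 0)]) h
              = PySem.Dict.mk [("C1", a), ("C2", b + h.2 * stk stocks "C2" h.1), ("C3", c), ("L1", 0)] := by
            simp [stepA, h1, h2, stk, PySem.Dict.modify]
            rfl
          rw [hs, ih]
          have e1 : hit stocks "C1" ["A", "B", "C"] h = 0 := by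
            push Not at h1; simp [hit, h1]
          have e2 : hit stocks "C2" ["D", "E", "F"] h = h.2 * stk stocks "C2" h.1 := by
            simp [hit, h2]
          have e3 : hit stocks "C3" ["G", "H", "I"] h = 0 := by
            rcases h2 with h2 | h2 | h2 <;> simp [hit, h2]
          rw [e1, e2, e3]; ring_nf
        · by_cases h3 : h.1 = "G" ∨ h.1 = "H" ∨ h.1 = "I"
          · have hs : stepA stocks (PySem.Dict.mk [("C1", a), ("C2", b), ("C3", c), ("L1", 0)]) h
                = PySem.Dict.mk [("C1", a), ("C2", b), ("C3", c + h.2 * stk stocks "C3" h.1), ("L1", 0)] := by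
              simp [stepA, h1, h2, h3, stk, PySem.Dict.modify]
              rfl
            rw [hs, ih]
            have e1 : hit stocks "C1" ["A", "B", "C"] h = 0 := by
              push Not at h1; simp [hit, h1]
            have e2 : hit stocks "C2" ["D", "E", "F"] h = 0 := by
              push Not at h2; simp [hit, h2]
            have e3 : hit stocks "C3" ["G", "H", "I"] h = h.2 * stk stocks "C3" h.1 := by
              simp [hit, h3]
            rw [e1, e2, e3]; ring_nf
          · have hs : stepA stocks (PySem.Dict.mk [("C1", a), ("C2", b), ("C3", c), ("L1", 0)]) h
                = PySem.Dict.mk [("C1", a), ("C2", b), ("C3", c), ("L1", 0)] := by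
              simp [stepA, h1, h2, h3]
            rw [hs, ih]
            have e1 : hit stocks "C1" ["A", "B", "C"] h = 0 := by
              push Not at h1; simp [hit, h1]
            have e2 : hit stocks "C2" ["D", "E", "F"] h = 0 := by
              push Not at h2; simp [hit, h2]
            have e3 : hit stocks "C3" ["G", "H", "I"] h = 0 := by
              push Not at h3; simp [hit, h3]
            rw [e1, e2, e3]; ring_nf

-- B's fold over pvCats, expanded to the literal 4-entry list
theorem B_items (data : List (String × Int)) (stocks : List (String × List (String × Int))) :
    initialize_weights_alt data stocks
    = [("C1", catWeight data stocks "C1" ["A", "B", "C"]),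
       ("C2", catWeight data stocks "C2" ["D", "E", "F"]),
       ("C3", catWeight data stocks "C3" ["G", "H", "I"]),
       ("L1", 0)] := by
  simp [initialize_weights_alt, pvCats, PySem.Dict.insert, PySem.Dict.empty]

-- B's per-category sum = sum of the letter summands
theorem catWeight_eq (data : List (String × Int)) (stocks : List (String × List (String × Int)))
    (cat : String) (prods : List String) :
    catWeight data stocks cat prods = (prods.map (gB data stocks cat)).sum := by
  unfold catWeight
  have hf : (fun (s : Int) (p : String) =>
      if ((PySem.Dict.mk data).get? p).isSome then
        s + (PySem.Dict.mk data).getD p 0 * (PySem.Dict.mk ((PySem.Dict.mk stocks).getD cat [])).getD p 0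
      else s)
      = fun s p => s + gB data stocks cat p := by
    funext s p
    by_cases h : ((PySem.Dict.mk data).get? p).isSome <;> simp [gB, stk, h]
  rw [hf, PySem.List.foldl_add]
  simp

theorem initialize_weights_spec : Claim_equal_initialize_weights := by
  intro data stocks _ hpre
  obtain ⟨hnd, _⟩ := hpre
  unfold Spec_initialize_weights initialize_weights
  rw [B_items, A_fold stocks data 0 0 0]
  rw [catWeight_eq, catWeight_eq, catWeight_eq]
  rw [sum_hit stocks "C1" _ (by decide) data hnd,
      sum_hit stocks "C2" _ (by decide) data hnd,
      sum_hit stocks "C3" _ (by decide) data hnd]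
  simp
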